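-- pv_equiv track=rewrite | github.com/cchopin/nginx_attack_parser | nginx_attack_parser.py | normalize_log_line
-- ===== SOURCE A (Python) =====
-- def normalize_log_line(line):
--     """Normalize a log line by removing newlines and extra spaces."""
--     result = ""
--     in_quotes = False
--     for char in line:
--         if char == '"':
--             in_quotes = not in_quotes
--         if char.isspace() and not in_quotes and result and result[-1].isspace():
--             continue
--         result += char
--     return result.strip()
-- ===== SOURCE B (Python) =====
-- def normalize_log_line(line):
--     """Normalize a log line by removing newlines and extra spaces."""
--     parts = line.split('"')
--     for i in range(0, len(parts), 2):
--         seg = parts[i]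
--         out = []
--         prev_space = False
--         for ch in seg:
--             sp = ch.isspace()
--             if not (sp and prev_space):
--                 out.append(ch)
--             prev_space = sp
--         parts[i] = ''.join(out)
--     return '"'.join(parts).strip()
-- ===== Notes on version B (the rewrite author's own statement) =====
-- stated objective: alternative
-- what changed: B splits the line at quote characters first and collapses whitespace runs only in the even (outside-quotes) segments, then rejoins and strips, instead of threading an in_quotes flag through a single character loop; B builds each segment as a char list joined at the end rather than repeated string concatenation.
import Mathlib
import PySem

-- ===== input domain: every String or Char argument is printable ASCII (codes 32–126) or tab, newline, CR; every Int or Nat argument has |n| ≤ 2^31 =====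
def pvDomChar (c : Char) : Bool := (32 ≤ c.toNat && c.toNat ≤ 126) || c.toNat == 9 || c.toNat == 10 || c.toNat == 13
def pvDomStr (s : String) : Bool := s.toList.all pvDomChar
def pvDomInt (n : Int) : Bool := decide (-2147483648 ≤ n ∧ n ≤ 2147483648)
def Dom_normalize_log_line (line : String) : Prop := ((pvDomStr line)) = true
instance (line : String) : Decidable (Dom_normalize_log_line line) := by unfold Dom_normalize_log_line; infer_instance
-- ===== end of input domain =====

-- B splits the line on '"' and collapses whitespace runs only in the even (outside-quotes)
-- segments, instead of threading an in_quotes flag through one character loop (alternative decomposition).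

-- ===== PORT A =====
-- one loop iteration of A: toggle in_quotes on '"', then append unless a whitespace
-- char outside quotes follows a whitespace char already at the end of result
def normStep (st : List Char × Bool) (char : Char) : List Char × Bool :=
  let in_quotes := if char = '"' then !st.2 else st.2
  if PySem.Chars.isspace char && !in_quotes && !st.1.isEmpty &&
     (match st.1.getLast? with | some l => PySem.Chars.isspace l | none => false) then
    (st.1, in_quotes)
  else
    (st.1 ++ [char], in_quotes)

def normalize_log_line (line : String) : String :=
  String.mk (PySem.Chars.strip (line.toList.foldl normStep ([], false)).1)

-- ===== PORT B =====
-- one iteration of B's inner loop: append ch unless it is a space following a space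
def collapseStep (st : List Char × Bool) (ch : Char) : List Char × Bool :=
  let sp := PySem.Chars.isspace ch
  (if sp && st.2 then st.1 else st.1 ++ [ch], sp)

def collapseSeg (seg : List Char) : List Char :=
  (seg.foldl collapseStep ([], false)).1

-- Source B updates parts[i] in place for even i; rendered as a map over the enumerated parts
def normalize_log_line_alt (line : String) : String :=
  let parts := PySem.Chars.splitOn line.toList ['"']
  let parts := (PySem.List.enumerate parts).map
    (fun ip => if ip.1 % 2 == 0 then collapseSeg ip.2 else ip.2)
  String.mk (PySem.Chars.strip (PySem.Chars.join ['"'] parts))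

-- ===== PRECONDITION & SPEC =====
def Spec_normalize_log_line (line : String) (out : String) : Prop := out = normalize_log_line_alt line
instance (line : String) (out : String) : Decidable (Spec_normalize_log_line line out) := by unfold Spec_normalize_log_line; infer_instance

-- ===== CLAIM (what is proved, stated in full; the proofs are below) =====
def Claim_equal_normalize_log_line : Prop := ∀ (line : String), Dom_normalize_log_line line → Spec_normalize_log_line line (normalize_log_line line)

-- ===== LEMMAS AND PROOFS =====

-- does acc end in a whitespace char?
def lastWs (acc : List Char) : Bool :=
  match acc.getLast? with | some l => PySem.Chars.isspace l | none => false

-- collapse of a whitespace run, given whether the previous char was whitespace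
def collapseFrom (b : Bool) : List Char → List Char
  | [] => []
  | c :: rest =>
    if PySem.Chars.isspace c && b then collapseFrom b rest
    else c :: collapseFrom (PySem.Chars.isspace c) rest

-- split on '"' as a structural recursion
def qsplit : List Char → List (List Char)
  | [] => [[]]
  | c :: rest =>
    if c = '"' then [] :: qsplit rest
    else match qsplit rest with
         | p :: ps => (c :: p) :: ps
         | [] => [[c]]

-- reference result over the segment list: collapse outside quotes, copy inside
def procSegs (inq b : Bool) : List (List Char) → List Char
  | [] => []
  | [p] => if inq then p else collapseFrom b p
  | p :: q :: rest =>
    (if inq then p else collapseFrom b p) ++ '"' :: procSegs (!inq) false (q :: rest)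

-- final in_quotes state after the segment list
def endq (inq : Bool) : List (List Char) → Bool
  | [] => inq
  | [_] => inq
  | _ :: q :: rest => endq (!inq) (q :: rest)

theorem lastWs_nil : lastWs [] = false := rfl

theorem lastWs_concat (xs : List Char) (c : Char) :
    lastWs (xs ++ [c]) = PySem.Chars.isspace c := by
  simp [lastWs]

theorem collapseSeg_go (seg : List Char) : ∀ (acc : List Char) (b : Bool),
    (seg.foldl collapseStep (acc, b)).1 = acc ++ collapseFrom b seg := by
  induction seg with
  | nil => intro acc b; simp [collapseFrom]
  | cons c rest ih =>
    intro acc b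
    simp only [List.foldl_cons, collapseStep]
    by_cases hcb : (PySem.Chars.isspace c && b) = true
    · have h2 : PySem.Chars.isspace c = true ∧ b = true := by simpa using hcb
      rw [if_pos hcb, ih]
      simp [collapseFrom, h2.1, h2.2]
    · rw [if_neg hcb, ih]
      simp [collapseFrom, hcb]

theorem collapseSeg_eq (seg : List Char) : collapseSeg seg = collapseFrom false seg := by
  simpa using collapseSeg_go seg [] false

theorem isspace_quote : PySem.Chars.isspace '"' = false := by decide

-- A over a quote-free segment with in_quotes = false
theorem cond_eq (acc : List Char) (c : Char) :
    (PySem.Chars.isspace c && !false && !acc.isEmpty &&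
      (match acc.getLast? with | some l => PySem.Chars.isspace l | none => false)) =
    (PySem.Chars.isspace c && lastWs acc) := by
  cases acc with
  | nil => simp [lastWs]
  | cons a as => simp [lastWs]

theorem foldA_out (seg : List Char) (h : '\"' ∉ seg) : ∀ (acc : List Char),
    seg.foldl normStep (acc, false) = (acc ++ collapseFrom (lastWs acc) seg, false) := by
  induction seg with
  | nil => intro acc; simp [collapseFrom]
  | cons c rest ih =>
    intro acc
    have hc : c ≠ '\"' := fun hq => h (hq ▸ List.mem_cons_self ..)
    have hrest : '\"' ∉ rest := fun hm => h (List.mem_cons_of_mem _ hm)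
    have ih' := ih hrest
    simp only [List.foldl_cons, normStep, if_neg hc, cond_eq]
    by_cases hk : (PySem.Chars.isspace c && lastWs acc) = true
    · have h2 : PySem.Chars.isspace c = true ∧ lastWs acc = true := by simpa using hk
      rw [if_pos hk, ih' acc]
      simp [collapseFrom, hk]
    · rw [if_neg hk, ih' (acc ++ [c])]
      simp only [collapseFrom, if_neg hk, lastWs_concat]
      simp

-- A over a quote-free segment with in_quotes = true copies it
theorem foldA_in (seg : List Char) (h : '"' ∉ seg) : ∀ (acc : List Char),
    seg.foldl normStep (acc, true) = (acc ++ seg, true) := by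
  induction seg with
  | nil => intro acc; simp
  | cons c rest ih =>
    intro acc
    have hc : c ≠ '"' := fun hq => h (hq ▸ List.mem_cons_self ..)
    have hrest : '"' ∉ rest := fun hm => h (List.mem_cons_of_mem _ hm)
    simp only [List.foldl_cons, normStep, if_neg hc]
    rw [if_neg (by simp), ih hrest (acc ++ [c])]
    simp

theorem normStep_quote (acc : List Char) (q : Bool) :
    normStep (acc, q) '"' = (acc ++ ['"'], !q) := by
  simp [normStep, isspace_quote]

-- A's whole loop over the rejoined segments
theorem foldA_join (ps : List (List Char)) (h : ∀ p ∈ ps, '"' ∉ p) :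
    ∀ (acc : List Char) (inq : Bool),
    (PySem.Chars.join ['"'] ps).foldl normStep (acc, inq) =
      (acc ++ procSegs inq (lastWs acc) ps, endq inq ps) := by
  induction ps with
  | nil => intro acc inq; simp [PySem.Chars.join, List.intercalate, procSegs, endq]
  | cons p tail ih =>
    intro acc inq
    have hp : '"' ∉ p := h p (List.mem_cons_self ..)
    have htail : ∀ x ∈ tail, '"' ∉ x := fun x hx => h x (List.mem_cons_of_mem _ hx)
    cases tail with
    | nil =>
      cases inq with
      | false => simp [PySem.Chars.join_singleton, procSegs, endq, foldA_out p hp acc]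
      | true => simp [PySem.Chars.join_singleton, procSegs, endq, foldA_in p hp acc]
    | cons q rest =>
      rw [PySem.Chars.join_cons_cons]
      cases inq with
      | false =>
        rw [List.foldl_append, List.foldl_append, foldA_out p hp acc, List.foldl_cons,
            normStep_quote, List.foldl_nil,
            ih htail (acc ++ collapseFrom (lastWs acc) p ++ ['\"']) (!false),
            lastWs_concat, isspace_quote]
        simp [procSegs, endq]
      | true =>
        rw [List.foldl_append, List.foldl_append, foldA_in p hp acc, List.foldl_cons,
            normStep_quote, List.foldl_nil,
            ih htail (acc ++ p ++ ['\"']) (!true),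
            lastWs_concat, isspace_quote]
        simp [procSegs, endq]

theorem qsplit_ne_nil (l : List Char) : qsplit l ≠ [] := by
  induction l with
  | nil => simp [qsplit]
  | cons c rest ih =>
    by_cases h : c = '"'
    · simp [qsplit, h]
    · simp only [qsplit, if_neg h]
      cases hq : qsplit rest with
      | nil => simp
      | cons p ps => simp

theorem qsplit_no_quote (l : List Char) : ∀ p ∈ qsplit l, '"' ∉ p := by
  induction l with
  | nil => simp [qsplit]
  | cons c rest ih =>
    by_cases h : c = '"'
    · simp only [qsplit, if_pos h]
      intro p hp
      rcases List.mem_cons.mp hp with rfl | hp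
      · simp
      · exact ih p hp
    · simp only [qsplit, if_neg h]
      cases hq : qsplit rest with
      | nil =>
        intro p hp
        rcases List.mem_cons.mp hp with rfl | hp
        · intro hm
          rcases List.mem_singleton.mp hm with rfl
          exact h rfl
        · simp at hp
      | cons p0 ps =>
        intro p hp
        rcases List.mem_cons.mp hp with rfl | hp
        · intro hm
          rcases List.mem_cons.mp hm with rfl | hm
          · exact h rfl
          · exact ih p0 (by simp [hq]) hm
        · exact ih p (by simp [hq, hp])

theorem qsplit_join (l : List Char) : PySem.Chars.join ['"'] (qsplit l) = l := by
  induction l with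
  | nil => simp [qsplit, PySem.Chars.join_singleton]
  | cons c rest ih =>
    by_cases h : c = '"'
    · subst h
      simp only [qsplit, reduceIte]
      cases hq : qsplit rest with
      | nil => exact absurd hq (qsplit_ne_nil rest)
      | cons p ps =>
        rw [PySem.Chars.join_cons_cons]
        rw [hq] at ih
        simp [ih]
    · simp only [qsplit, if_neg h]
      cases hq : qsplit rest with
      | nil => exact absurd hq (qsplit_ne_nil rest)
      | cons p ps =>
        rw [hq] at ih
        cases ps with
        | nil => simp_all [PySem.Chars.join_singleton]
        | cons q rs =>
          rw [PySem.Chars.join_cons_cons] at ih ⊢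
          simp [ih]

-- go-level characterization of PySem's splitOn on a single '"' separator
theorem splitOn_go_eq (fuel : Nat) : ∀ (l cur : List Char) (acc : List (List Char)),
    l.length < fuel →
    PySem.Chars.splitOn.go ['"'] fuel l cur acc =
      acc.reverse ++ (match qsplit l with
        | p :: ps => (cur.reverse ++ p) :: ps
        | [] => []) := by
  induction fuel with
  | zero => intro l cur acc h; omega
  | succ f ih =>
    intro l cur acc h
    cases l with
    | nil =>
      rw [PySem.Chars.splitOn.go.eq_2 _ _ _ _ (by omega)]
      simp [qsplit]
    | cons c rest =>
      rw [PySem.Chars.splitOn.go.eq_3]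
      by_cases hc : c = '\"'
      · subst hc
        have hpre : List.isPrefixOf ['\"'] ('\"' :: rest) = true := by simp [List.isPrefixOf]
        rw [if_pos hpre]
        simp only [List.length_cons, List.length_nil, List.drop_succ_cons, List.drop_zero]
        rw [ih rest [] _ (by simpa using Nat.lt_of_succ_lt_succ h)]
        simp only [qsplit, reduceIte]
        cases hq : qsplit rest with
        | nil => exact absurd hq (qsplit_ne_nil rest)
        | cons p ps => simp
      · have hpre : ¬ List.isPrefixOf ['\"'] (c :: rest) = true := by
          simp [List.isPrefixOf]; exact fun hq => hc hq.symm
        rw [if_neg hpre]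
        rw [ih rest (c :: cur) acc (by simpa using Nat.lt_of_succ_lt_succ h)]
        simp only [qsplit, if_neg hc]
        cases hq : qsplit rest with
        | nil => exact absurd hq (qsplit_ne_nil rest)
        | cons p ps => simp

theorem splitOn_eq_qsplit (l : List Char) :
    PySem.Chars.splitOn l ['"'] = qsplit l := by
  rw [PySem.Chars.splitOn, splitOn_go_eq (l.length + 1) l [] [] (by omega)]
  cases hq : qsplit l with
  | nil => exact absurd hq (qsplit_ne_nil l)
  | cons p ps => simp

-- B's enumerate-parity map equals the alternating reference
theorem mapEnum_eq_procSegs (ps : List (List Char)) : ∀ (k : Int),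
    PySem.Chars.join ['"'] ((PySem.List.enumerate ps k).map
      (fun ip => if ip.1 % 2 == 0 then collapseSeg ip.2 else ip.2)) =
    procSegs (!(k % 2 == 0)) false ps := by
  induction ps with
  | nil => intro k; simp [PySem.List.enumerate, PySem.Chars.join, List.intercalate, procSegs]
  | cons p tail ih =>
    intro k
    rw [PySem.List.enumerate_cons]
    cases tail with
    | nil =>
      simp only [PySem.List.enumerate_nil, List.map_cons, List.map_nil,
        PySem.Chars.join_singleton, procSegs]
      by_cases hk : k % 2 = 0
      · simp [hk, collapseSeg_eq]
      · have : (k % 2 == 0) = false := by simp [hk]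
        simp [this]
    | cons q rest =>
      have hjoin : ∀ (a : List Char) (l : List (List Char)), l ≠ [] →
          PySem.Chars.join ['\"'] (a :: l) = a ++ ['\"'] ++ PySem.Chars.join ['\"'] l := by
        intro a l hl
        cases l with
        | nil => exact absurd rfl hl
        | cons b bs => rw [PySem.Chars.join_cons_cons]
      rw [List.map_cons, hjoin _ _ (by simp [PySem.List.enumerate_cons]), ih (k + 1)]
      have hpar : ((k + 1) % 2 == 0) = !(k % 2 == 0) := by
        by_cases hk : k % 2 = 0
        · have h1 : (k + 1) % 2 = 1 := by omega
          simp [hk, h1]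
        · have h1 : k % 2 = 1 := by omega
          have h2 : (k + 1) % 2 = 0 := by omega
          simp [h1, h2]
      rw [hpar]
      by_cases hk : k % 2 = 0
      · have hb : (k % 2 == 0) = true := by simp [hk]
        simp [hb, procSegs, collapseSeg_eq]
      · have hb : (k % 2 == 0) = false := by simp [hk]
        simp [hb, procSegs]

-- ===== VERDICT (by name: the statement is the Claim_ definition above) =====
theorem normalize_log_line_spec : Claim_equal_normalize_log_line := by
  intro line _
  unfold Spec_normalize_log_line normalize_log_line normalize_log_line_alt
  dsimp only
  rw [splitOn_eq_qsplit, mapEnum_eq_procSegs (qsplit line.toList) 0]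
  have h1 : line.toList.foldl normStep ([], false) =
      ([] ++ procSegs false (lastWs []) (qsplit line.toList), endq false (qsplit line.toList)) := by
    conv_lhs => rw [← qsplit_join line.toList]
    exact foldA_join (qsplit line.toList) (qsplit_no_quote line.toList) [] false
  rw [h1]
  norm_num [lastWs_nil]
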